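-- pv_equiv track=rewrite | github.com/JordanFitz/aoc2023 | 07/part2.py | get_joker_groups
-- ===== SOURCE A (Python) =====
-- def get_joker_groups(hand):
--     streak = 1
--     groups = []
--     for i,curr in enumerate(hand[1:]):
--         if curr != 'J': continue
--         last = hand[i]
--         if curr == last:
--             streak += 1
--             streak_type = curr
--         else:
--             if streak > 1:
--                 groups.append(streak)
--             streak = 1
--     if streak > 1:
--         groups.append(streak)
--
--     if len(groups) == 0 and hand.find('J') != -1:
--         return [1]
--
--     return groups
-- ===== SOURCE B (Python) =====
-- def get_joker_groups(hand):
--     chars = list(hand)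
--     prevs = [None] + chars[:-1]
--     nexts = chars[1:] + [None]
--     starts = [i for i, (c, p) in enumerate(zip(chars, prevs)) if c == 'J' and p != 'J']
--     ends = [i for i, (c, nx) in enumerate(zip(chars, nexts)) if c == 'J' and nx != 'J']
--     groups = [e - s + 1 for s, e in zip(starts, ends) if e - s + 1 >= 2]
--     if not groups and hand.find('J') != -1:
--         return [1]
--     return groups
-- ===== Notes on version B (the rewrite author's own statement) =====
-- stated objective: alternative
-- what changed: Replaced A's sequential streak counter (mismatch-reset + trailing flush) by boundary detection: mark run starts (J with non-J predecessor) and run ends (J with non-J successor) via neighbor-shifted lists, pair k-th start with k-th end, and take lengths end-start+1 filtered to >=2; same fallback.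
import Mathlib
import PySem

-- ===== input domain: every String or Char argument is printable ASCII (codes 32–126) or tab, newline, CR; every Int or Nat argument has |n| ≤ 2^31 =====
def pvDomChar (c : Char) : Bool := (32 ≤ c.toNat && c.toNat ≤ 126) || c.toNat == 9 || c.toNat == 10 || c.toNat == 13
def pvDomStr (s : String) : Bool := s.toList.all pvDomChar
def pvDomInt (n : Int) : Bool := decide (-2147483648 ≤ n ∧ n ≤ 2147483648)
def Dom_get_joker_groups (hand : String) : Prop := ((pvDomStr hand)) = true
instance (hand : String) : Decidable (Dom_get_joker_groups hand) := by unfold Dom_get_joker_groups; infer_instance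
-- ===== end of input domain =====

-- B replaces A's sequential streak counter by boundary detection (pairing each J-run's start
-- index with its end index via neighbor-shifted lists); alternative algorithm, exact equivalence.


-- ===== PORT A =====
-- the final `if streak > 1: groups.append(streak)` flush (also used inside the loop)
def pvFlushA (streak : Int) (groups : List Int) : List Int :=
  if 1 < streak then groups ++ [streak] else groups

-- one loop iteration of A: `last` = hand[i], `curr` = hand[i+1] (the pairs (hand[i], hand[i+1])
-- are exactly cs.zip (cs.drop 1)); the dead local `streak_type` is omitted
def pvLoopA (st : Int × List Int) (p : Char × Char) : Int × List Int :=
  if p.2 ≠ 'J' then st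
  else if p.2 = p.1 then (st.1 + 1, st.2)
  else (1, pvFlushA st.1 st.2)

def get_joker_groups (hand : String) : List Int :=
  let cs := hand.toList
  let st := List.foldl pvLoopA (1, []) (cs.zip (cs.drop 1))
  let groups := pvFlushA st.1 st.2
  if groups.length = 0 ∧ PySem.Str.find hand "J" ≠ -1 then [1] else groups

-- ===== PORT B =====
-- Source B: chars = list(hand); prevs = [None] + chars[:-1]; nexts = chars[1:] + [None];
-- starts / ends by comprehension over enumerate(zip(..)); lengths e - s + 1 filtered to >= 2
def get_joker_groups_alt (hand : String) : List Int :=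
  let chars := hand.toList
  let prevs : List (Option Char) := none :: chars.dropLast.map some
  let nexts : List (Option Char) := (chars.drop 1).map some ++ [none]
  let starts := (PySem.List.enumerate (chars.zip prevs) 0).filterMap
      (fun x => if x.2.1 = 'J' ∧ x.2.2 ≠ some 'J' then some x.1 else none)
  let ends := (PySem.List.enumerate (chars.zip nexts) 0).filterMap
      (fun x => if x.2.1 = 'J' ∧ x.2.2 ≠ some 'J' then some x.1 else none)
  let groups := (starts.zip ends).filterMap
      (fun p => if 2 ≤ p.2 - p.1 + 1 then some (p.2 - p.1 + 1) else none)
  if groups = [] ∧ PySem.Str.find hand "J" ≠ -1 then [1] else groups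

-- ===== PRECONDITION & SPEC =====
def Spec_get_joker_groups (hand : String) (out : List Int) : Prop := out = get_joker_groups_alt hand
instance (hand : String) (out : List Int) : Decidable (Spec_get_joker_groups hand out) := by unfold Spec_get_joker_groups; infer_instance

-- ===== CLAIM =====
def Claim_equal_get_joker_groups : Prop := ∀ (hand : String), Dom_get_joker_groups hand → Spec_get_joker_groups hand (get_joker_groups hand)

-- ===== LEMMAS AND PROOFS =====
-- the lengths of the maximal runs of 'J' in a character list, in order (proof-side reference value)
def pvJLens : List Char → List Int
  | [] => []
  | c :: cs =>
    if c = 'J' then (1 + ((cs.takeWhile (· = 'J')).length : Int)) :: pvJLens (cs.dropWhile (· = 'J'))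
    else pvJLens cs
termination_by cs => cs.length
decreasing_by
  · simp; exact List.length_dropWhile_le _ _
  · simp

-- recursion computing B's start indices: pj = "previous char was 'J'"
def pvStarts : List Char → Bool → Int → List Int
  | [], _, _ => []
  | c :: cs, pj, k => (if c = 'J' ∧ pj = false then [k] else []) ++ pvStarts cs (decide (c = 'J')) (k + 1)

-- recursion computing B's end indices (next char read from the list itself)
def pvEnds : List Char → Int → List Int
  | [], _ => []
  | [c], k => if c = 'J' then [k] else []
  | c :: d :: cs, k => (if c = 'J' ∧ d ≠ 'J' then [k] else []) ++ pvEnds (d :: cs) (k + 1)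

-- filtering ≥2 distributes over cons
lemma pvGe2_cons (s : Int) (L : List Int) :
    (s :: L).filter (fun n => 2 ≤ n) = (if 1 < s then [s] else []) ++ L.filter (fun n => 2 ≤ n) := by
  by_cases h : (2 : Int) ≤ s
  · rw [List.filter_cons_of_pos (by simpa using h), if_pos (by omega)]; rfl
  · rw [List.filter_cons_of_neg (by simpa using h), if_neg (by omega)]; rfl

-- the A-side loop invariant
lemma pvLoopA_main :
    ∀ cs : List Char, ∀ (prev : Char) (streak : Int) (acc : List Int),
    (pvFlushA (List.foldl pvLoopA (streak, acc) ((prev :: cs).zip cs)).1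
        (List.foldl pvLoopA (streak, acc) ((prev :: cs).zip cs)).2) =
      acc ++ (if prev = 'J'
          then (streak + ((cs.takeWhile (· = 'J')).length : Int)) :: pvJLens (cs.dropWhile (· = 'J'))
          else streak :: pvJLens cs).filter (fun n => 2 ≤ n) := by
  intro cs
  induction cs with
  | nil =>
    intro prev streak acc
    by_cases hp : prev = 'J' <;>
      simp [hp, pvFlushA, pvJLens, pvGe2_cons] <;> split_ifs <;> simp
  | cons c cs ih =>
    intro prev streak acc
    rw [show (prev :: c :: cs).zip (c :: cs) = (prev, c) :: (c :: cs).zip cs from rfl,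
      List.foldl_cons]
    by_cases hc : c = 'J'
    · subst hc
      by_cases hp : prev = 'J'
      · subst hp
        rw [show pvLoopA (streak, acc) ('J', 'J') = (streak + 1, acc) from by simp [pvLoopA],
          ih 'J' (streak + 1) acc]
        rw [if_pos rfl, List.takeWhile_cons_of_pos (by simp),
          List.dropWhile_cons_of_pos (by simp)]
        simp only [List.length_cons]
        push_cast
        ring_nf
      · rw [show pvLoopA (streak, acc) (prev, 'J') = (1, pvFlushA streak acc) from by
            simp [pvLoopA, Ne.symm hp],
          ih 'J' 1 (pvFlushA streak acc)]
        rw [if_pos rfl, if_neg hp]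
        conv_rhs => rw [pvJLens, if_pos rfl, pvGe2_cons]
        unfold pvFlushA
        split_ifs <;> simp
    · rw [show pvLoopA (streak, acc) (prev, c) = (streak, acc) from by simp [pvLoopA, hc],
        ih c streak acc]
      simp only [if_neg hc]
      by_cases hp : prev = 'J'
      · rw [if_pos hp, List.takeWhile_cons_of_neg (by simp [hc]),
          List.dropWhile_cons_of_neg (by simp [hc])]
        conv_rhs => rw [pvJLens, if_neg hc]
        simp
      · rw [if_neg hp]
        conv_rhs => rw [pvJLens, if_neg hc]

-- A's groups list equals the ≥2-filter of the run lengths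
lemma pvGroupsA_eq (cs : List Char) :
    pvFlushA (List.foldl pvLoopA (1, []) (cs.zip (cs.drop 1))).1
        (List.foldl pvLoopA (1, []) (cs.zip (cs.drop 1))).2 =
      (pvJLens cs).filter (fun n => 2 ≤ n) := by
  cases cs with
  | nil => simp [pvFlushA, pvJLens]
  | cons c cs =>
    have hd : (c :: cs).drop 1 = cs := rfl
    rw [hd, pvLoopA_main cs c 1 [], pvJLens]
    by_cases hc : c = 'J'
    · simp [hc]
    · simp only [if_neg hc, List.nil_append, pvGe2_cons, if_neg (by omega : ¬ (1:Int) < 1),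
        List.nil_append]

-- B's start comprehension equals pvStarts
lemma pvStarts_eq :
    ∀ (cs : List Char) (p : Option Char) (k : Int),
    ((PySem.List.enumerate (cs.zip (p :: cs.dropLast.map some)) k).filterMap
        (fun x => if x.2.1 = 'J' ∧ x.2.2 ≠ some 'J' then some x.1 else none)) =
      pvStarts cs (decide (p = some 'J')) k := by
  intro cs
  induction cs with
  | nil => intro p k; simp [pvStarts, PySem.List.enumerate_nil]
  | cons c cs ih =>
    intro p k
    have hz : cs.zip ((c :: cs).dropLast.map some) = cs.zip (some c :: cs.dropLast.map some) := by
      cases cs with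
      | nil => simp
      | cons d ds => rfl
    rw [show (c :: cs).zip (p :: (c :: cs).dropLast.map some)
          = (c, p) :: cs.zip ((c :: cs).dropLast.map some) from rfl, hz,
      PySem.List.enumerate_cons, List.filterMap_cons, pvStarts, ih]
    by_cases hc : c = 'J'
    · by_cases hp : p = some 'J'
      · simp [hc, hp]
      · simp [hc, hp]
    · simp [hc]

-- B's end comprehension equals pvEnds
lemma pvEnds_eq :
    ∀ (cs : List Char) (k : Int),
    ((PySem.List.enumerate (cs.zip ((cs.drop 1).map some ++ [none])) k).filterMap
        (fun x => if x.2.1 = 'J' ∧ x.2.2 ≠ some 'J' then some x.1 else none)) =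
      pvEnds cs k := by
  intro cs
  induction cs with
  | nil => intro k; simp [pvEnds, PySem.List.enumerate_nil]
  | cons c cs ih =>
    intro k
    cases cs with
    | nil =>
      by_cases hc : c = 'J' <;>
        simp [pvEnds, PySem.List.enumerate_cons, PySem.List.enumerate_nil, hc]
    | cons d ds =>
      rw [show (c :: d :: ds).zip (((c :: d :: ds).drop 1).map some ++ [none])
            = (c, some d) :: (d :: ds).zip (((d :: ds).drop 1).map some ++ [none]) from rfl,
        PySem.List.enumerate_cons, List.filterMap_cons, ih, pvEnds]
      by_cases hc : c = 'J'
      · by_cases hd : d = 'J'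
        · simp [hc, hd]
        · simp [hc, hd]
      · simp [hc]

-- inside a J-run, pvStarts emits nothing
lemma pvStarts_run :
    ∀ (t : List Char), (∀ c ∈ t, c = 'J') → ∀ (rest : List Char) (k : Int),
    pvStarts (t ++ rest) true k = pvStarts rest true (k + t.length) := by
  intro t
  induction t with
  | nil => intro _ rest k; simp
  | cons c t ih =>
    intro h rest k
    have hc : c = 'J' := h c (by simp)
    rw [List.cons_append, pvStarts, if_neg (by simp [hc]), List.nil_append, hc,
      show decide (('J':Char) = 'J') = true from by decide,
      ih (fun x hx => h x (by simp [hx])) rest (k + 1),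
      show k + 1 + (t.length : Int) = k + ((('J' :: t).length : Nat) : Int) from by
        push_cast [List.length_cons]; ring]

-- pvStarts ignores the prev flag when the head is not 'J'
lemma pvStarts_headNotJ (cs : List Char) (h : ∀ x, cs.head? = some x → x ≠ 'J') (k : Int) :
    pvStarts cs true k = pvStarts cs false k := by
  cases cs with
  | nil => rfl
  | cons c cs =>
    have hc : c ≠ 'J' := h c rfl
    rw [pvStarts, pvStarts, if_neg (by simp [hc]), if_neg (by simp [hc])]

-- a whole J-run contributes exactly one end index
lemma pvEnds_run :
    ∀ (t : List Char), (∀ c ∈ t, c = 'J') →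
    ∀ (d : List Char), (∀ x, d.head? = some x → x ≠ 'J') → ∀ (k : Int),
    pvEnds (('J' :: t) ++ d) k = (k + t.length) :: pvEnds d (k + t.length + 1) := by
  intro t
  induction t with
  | nil =>
    intro _ d hd k
    cases d with
    | nil => simp [pvEnds]
    | cons x xs =>
      have hx : x ≠ 'J' := hd x rfl
      show pvEnds ('J' :: x :: xs) k = _
      rw [pvEnds, if_pos ⟨rfl, hx⟩]
      simp
  | cons c t ih =>
    intro h d hd k
    have hc : c = 'J' := h c (by simp)
    subst hc
    rw [show ('J' :: 'J' :: t) ++ d = 'J' :: (('J' :: t) ++ d) from rfl,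
      show 'J' :: (('J' :: t) ++ d) = 'J' :: 'J' :: (t ++ d) from rfl, pvEnds,
      if_neg (by simp), List.nil_append,
      show ('J' :: (t ++ d)) = ('J' :: t) ++ d from rfl,
      ih (fun x hx => h x (by simp [hx])) d hd (k + 1),
      show k + 1 + (t.length : Int) = k + ((('J' :: t).length : Nat) : Int) from by
        push_cast [List.length_cons]; ring]

-- the zipped start/end pairs give exactly the ≥2-filtered run lengths
lemma pvZip_main :
    ∀ (n : Nat) (cs : List Char), cs.length = n → ∀ (k : Int),
    ((pvStarts cs false k).zip (pvEnds cs k)).filterMap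
        (fun p => if 2 ≤ p.2 - p.1 + 1 then some (p.2 - p.1 + 1) else none) =
      (pvJLens cs).filter (fun n => 2 ≤ n) := by
  intro n
  induction n using Nat.strong_induction_on with
  | _ n ihn =>
  intro cs hn k
  cases cs with
  | nil => simp [pvStarts, pvEnds, pvJLens]
  | cons c cs =>
    by_cases hc : c = 'J'
    · subst hc
      have ht : ∀ x ∈ cs.takeWhile (· = 'J'), x = 'J' := by
        intro x hx
        simpa using List.mem_takeWhile_imp hx
      have hdhead : ∀ x, (cs.dropWhile (· = 'J')).head? = some x → x ≠ 'J' := by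
        intro x hx
        have := List.head?_dropWhile_not (p := (· = 'J')) (l := cs)
        rw [hx] at this
        simpa using this
      have hsplit : cs.takeWhile (· = 'J') ++ cs.dropWhile (· = 'J') = cs :=
        List.takeWhile_append_dropWhile
      have hS : pvStarts ('J' :: cs) false k
          = k :: pvStarts (cs.dropWhile (· = 'J')) false
              (k + 1 + ((cs.takeWhile (· = 'J')).length : Int)) := by
        rw [pvStarts, if_pos ⟨rfl, rfl⟩,
          show decide (('J':Char) = 'J') = true from by decide]
        conv_lhs => rw [← hsplit]
        rw [pvStarts_run _ ht _ (k + 1),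
          pvStarts_headNotJ _ hdhead]
        rfl
      have hE : pvEnds ('J' :: cs) k
          = (k + ((cs.takeWhile (· = 'J')).length : Int))
              :: pvEnds (cs.dropWhile (· = 'J'))
                (k + ((cs.takeWhile (· = 'J')).length : Int) + 1) := by
        have hrun := pvEnds_run _ ht _ hdhead k
        rw [List.cons_append, hsplit] at hrun
        exact hrun
      rw [hS, hE, List.zip_cons_cons, List.filterMap_cons]
      have hlt : (cs.dropWhile (· = 'J')).length < n := by
        have h1 := List.length_dropWhile_le (fun x => decide (x = 'J')) cs
        simp only [List.length_cons] at hn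
        omega
      have hrec := ihn (cs.dropWhile (· = 'J')).length hlt
        (cs.dropWhile (· = 'J')) rfl
        (k + 1 + ((cs.takeWhile (· = 'J')).length : Int))
      rw [show k + ((cs.takeWhile (· = 'J')).length : Int) + 1
          = k + 1 + ((cs.takeWhile (· = 'J')).length : Int) from by ring, hrec]
      rw [pvJLens, if_pos rfl, pvGe2_cons]
      have hv : k + ((cs.takeWhile (· = 'J')).length : Int) - k + 1
          = 1 + ((cs.takeWhile (· = 'J')).length : Int) := by ring
      by_cases h2 : (2:Int) ≤ 1 + ((cs.takeWhile (· = 'J')).length : Int)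
      · rw [if_pos (by omega), if_pos (by omega), hv]
        rfl
      · rw [if_neg (by omega), if_neg (by omega)]
        rfl
    · have hS : pvStarts (c :: cs) false k = pvStarts cs false (k + 1) := by
        rw [pvStarts, if_neg (by simp [hc]), List.nil_append,
          show decide (c = 'J') = false from by simp [hc]]
      have hE : pvEnds (c :: cs) k = pvEnds cs (k + 1) := by
        cases cs with
        | nil => simp [pvEnds, hc]
        | cons d ds => rw [pvEnds, if_neg (by simp [hc]), List.nil_append]
      rw [hS, hE, ihn cs.length (by simp only [List.length_cons] at hn; omega) cs rfl (k + 1),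
        pvJLens, if_neg hc]

-- ===== VERDICT =====
theorem get_joker_groups_spec : Claim_equal_get_joker_groups := by
  intro hand _
  unfold Spec_get_joker_groups
  simp only [get_joker_groups, get_joker_groups_alt]
  rw [pvGroupsA_eq hand.toList, pvStarts_eq, pvEnds_eq,
    show (decide ((none : Option Char) = some 'J')) = false from by decide,
    pvZip_main hand.toList.length hand.toList rfl]
  split_ifs with h1 h2 h2 <;> simp_all [List.length_eq_zero_iff]
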